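-- pv_equiv track=rewrite | github.com/lseman/logician | skills/coding/search_replace/scripts/search_replace.py | _parse_sed_substitute
-- ===== SOURCE A (Python) =====
-- def _parse_sed_substitute(script: str) -> tuple[str, str, str]:
--     raw = str(script or "").strip()
--     if len(raw) < 4 or not raw.startswith("s"):
--         raise ValueError("Only sed substitute scripts are supported, e.g. s/foo/bar/g")
--
--     delim = raw[1]
--     parts: list[str] = []
--     buf: list[str] = []
--     escaped = False
--     for ch in raw[2:]:
--         if escaped:
--             buf.append(ch)
--             escaped = False
--             continue
--         if ch == "\\":
--             buf.append(ch)
--             escaped = True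
--             continue
--         if ch == delim and len(parts) < 2:
--             parts.append("".join(buf))
--             buf = []
--             continue
--         buf.append(ch)
--     parts.append("".join(buf))
--     if len(parts) != 3:
--         raise ValueError("Invalid sed substitute script")
--
--     pattern, replacement, flags = parts
--     pattern = pattern.replace(f"\\{delim}", delim)
--     replacement = replacement.replace(f"\\{delim}", delim)
--     return pattern, replacement, flags
-- ===== SOURCE B (Python) =====
-- def _parse_sed_substitute(script: str) -> tuple[str, str, str]:
--     raw = str(script or "").strip()
--     if len(raw) < 4 or not raw.startswith("s"):
--         raise ValueError("Only sed substitute scripts are supported, e.g. s/foo/bar/g")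
--
--     delim = raw[1]
--     body = raw[2:]
--     # Tokenize the body once into units: a backslash escape pair, or a single char.
--     units: list[str] = []
--     i = 0
--     while i < len(body):
--         if body[i] == "\\" and i + 1 < len(body):
--             units.append(body[i:i + 2])
--             i += 2
--         else:
--             units.append(body[i])
--             i += 1
--     # An unescaped delimiter is exactly a one-char unit equal to delim.
--     if delim not in units:
--         raise ValueError("Invalid sed substitute script")
--     a = units.index(delim)
--     tail = units[a + 1:]
--     if delim not in tail:
--         raise ValueError("Invalid sed substitute script")
--     b = tail.index(delim)
--     esc = "\\" + delim
--     pattern = "".join(units[:a]).replace(esc, delim)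
--     replacement = "".join(tail[:b]).replace(esc, delim)
--     flags = "".join(tail[b + 1:])
--     return pattern, replacement, flags
-- ===== Notes on version B (the rewrite author's own statement) =====
-- stated objective: alternative
-- what changed: B tokenizes the body once into escape-pair/single-char units, then locates the two delimiter units with index/membership and slices out pattern, replacement and flags, instead of A's single char-by-char scan with an escaped flag and a parts/buf accumulator.
import Mathlib
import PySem

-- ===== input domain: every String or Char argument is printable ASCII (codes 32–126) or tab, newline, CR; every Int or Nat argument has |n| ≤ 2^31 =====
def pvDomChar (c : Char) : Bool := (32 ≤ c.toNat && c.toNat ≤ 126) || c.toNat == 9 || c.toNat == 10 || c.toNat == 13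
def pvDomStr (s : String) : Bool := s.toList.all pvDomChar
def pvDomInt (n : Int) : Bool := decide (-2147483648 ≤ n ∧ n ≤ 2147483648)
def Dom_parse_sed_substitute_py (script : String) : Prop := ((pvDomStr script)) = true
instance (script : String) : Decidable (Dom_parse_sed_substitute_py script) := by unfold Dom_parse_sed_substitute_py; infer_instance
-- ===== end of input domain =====

-- B tokenizes the body once into escape-pair/single-char units and then locates the two
-- delimiter units and slices, instead of A's single char-by-char accumulator scan. Objective: alternative.

-- ===== PORT A =====
-- A's for-loop over raw[2:] with state (parts, buf, escaped); buf kept as List Char, joined at the end.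
def pvScanA (delim : Char) (cs : List Char) (parts : List (List Char)) (buf : List Char)
    (escaped : Bool) : List (List Char) :=
  match cs with
  | [] => parts ++ [buf]
  | c :: rest =>
    if escaped then pvScanA delim rest parts (buf ++ [c]) false
    else if c = '\\' then pvScanA delim rest parts (buf ++ [c]) true
    else if c = delim ∧ parts.length < 2 then pvScanA delim rest (parts ++ [buf]) [] false
    else pvScanA delim rest parts (buf ++ [c]) false

def parse_sed_substitute_py (script : String) : String × String × String :=
  let raw := PySem.Chars.strip script.toList   -- str(script or "").strip(): '' strips to '' either way
  if raw.length < 4 ∨ ¬ (PySem.Chars.startswith raw ['s'] = true) then ("", "", "")  -- ValueError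
  else
    let delim := PySem.List.pyGetD raw 1 ' '   -- raw[1], in range since len ≥ 4
    let parts := pvScanA delim (PySem.List.slice raw (some 2) none) [] [] false
    match parts with
    | [p, r, f] =>
        (String.ofList (PySem.Chars.replace p ['\\', delim] [delim]),
         String.ofList (PySem.Chars.replace r ['\\', delim] [delim]),
         String.ofList f)
    | _ => ("", "", "")                        -- len(parts) != 3: ValueError

-- ===== PORT B =====
-- Source B's while-loop tokenizer: escape pair (backslash + next char) or a single char.
def pvUnits : List Char → List (List Char)
  | [] => []
  | c :: rest =>
    match rest with
    | x :: r => if c = '\\' then ['\\', x] :: pvUnits r else [c] :: pvUnits (x :: r)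
    | [] => [[c]]

def parse_sed_substitute_py_alt (script : String) : String × String × String :=
  let raw := PySem.Chars.strip script.toList
  if raw.length < 4 ∨ ¬ (PySem.Chars.startswith raw ['s'] = true) then ("", "", "")  -- ValueError
  else
    let delim := PySem.List.pyGetD raw 1 ' '
    let units := pvUnits (PySem.List.slice raw (some 2) none)
    match PySem.List.index? units [delim] with
    | none => ("", "", "")                     -- delim not in units: ValueError
    | some a =>
      let tail := PySem.List.slice units (some ((a : Int) + 1)) none
      match PySem.List.index? tail [delim] with
      | none => ("", "", "")                   -- delim not in tail: ValueError
      | some b =>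
        (String.ofList (PySem.Chars.replace (PySem.Chars.join [] (PySem.List.slice units none (some (a : Int)))) ['\\', delim] [delim]),
         String.ofList (PySem.Chars.replace (PySem.Chars.join [] (PySem.List.slice tail none (some (b : Int)))) ['\\', delim] [delim]),
         String.ofList (PySem.Chars.join [] (PySem.List.slice tail (some ((b : Int) + 1)) none)))

-- ===== PRECONDITION & SPEC =====
-- number of unescaped occurrences of d (standard sed escape reading) — the condition under
-- which A's scan yields exactly three parts
def pvCntU (d : Char) (esc : Bool) : List Char → Nat
  | [] => 0
  | c :: r =>
    if esc then pvCntU d false r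
    else if c = '\\' then pvCntU d true r
    else if c = d then 1 + pvCntU d false r else pvCntU d false r

-- Pre_ admits exactly the scripts A returns on: stripped length ≥ 4, the required substitute-command prefix, and at
-- least two unescaped delimiters in the body (otherwise A raises ValueError).
def Pre_parse_sed_substitute_py (script : String) : Prop :=
  let raw := PySem.Chars.strip script.toList
  4 ≤ raw.length ∧ PySem.Chars.startswith raw ['s'] = true ∧
    2 ≤ pvCntU (PySem.List.pyGetD raw 1 ' ') false (PySem.List.slice raw (some 2) none)
instance (script : String) : Decidable (Pre_parse_sed_substitute_py script) := by
  unfold Pre_parse_sed_substitute_py; infer_instance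

def pvWitness_parse_sed_substitute_py : String := "s/foo/bar/g"

def Spec_parse_sed_substitute_py (script : String) (out : String × String × String) : Prop := out = parse_sed_substitute_py_alt script
instance (script : String) (out : String × String × String) : Decidable (Spec_parse_sed_substitute_py script out) := by unfold Spec_parse_sed_substitute_py; infer_instance

-- ===== CLAIM (what is proved, stated in full; the proofs are below) =====
def Claim_equal_parse_sed_substitute_py : Prop := ∀ (script : String), Dom_parse_sed_substitute_py script → Pre_parse_sed_substitute_py script → Spec_parse_sed_substitute_py script (parse_sed_substitute_py script)

-- ===== LEMMAS AND PROOFS =====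

-- unit-level version of A's scan (proof-only bridge)
def pvScanU (d : Char) (us : List (List Char)) (parts : List (List Char)) (buf : List Char) :
    List (List Char) :=
  match us with
  | [] => parts ++ [buf]
  | u :: rest =>
    if u = [d] ∧ parts.length < 2 then pvScanU d rest (parts ++ [buf]) []
    else pvScanU d rest parts (buf ++ u)

-- one-step reduction lemmas (controlled unfolding)
theorem pvScanA_nil (d : Char) (parts : List (List Char)) (buf : List Char) (e : Bool) :
    pvScanA d [] parts buf e = parts ++ [buf] := by rw [pvScanA]

theorem pvScanA_cons_false (d c : Char) (rest : List Char) (parts : List (List Char)) (buf : List Char) :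
    pvScanA d (c :: rest) parts buf false =
      if c = '\\' then pvScanA d rest parts (buf ++ [c]) true
      else if c = d ∧ parts.length < 2 then pvScanA d rest (parts ++ [buf]) [] false
      else pvScanA d rest parts (buf ++ [c]) false := by rw [pvScanA]; simp

theorem pvScanA_cons_true (d c : Char) (rest : List Char) (parts : List (List Char)) (buf : List Char) :
    pvScanA d (c :: rest) parts buf true = pvScanA d rest parts (buf ++ [c]) false := by
  rw [pvScanA]; simp

theorem pvScanU_cons (d : Char) (u : List Char) (rest parts : List (List Char)) (buf : List Char) :
    pvScanU d (u :: rest) parts buf =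
      if u = [d] ∧ parts.length < 2 then pvScanU d rest (parts ++ [buf]) []
      else pvScanU d rest parts (buf ++ u) := by rw [pvScanU]

theorem pvUnits_pair (x : Char) (r : List Char) : pvUnits ('\\' :: x :: r) = ['\\', x] :: pvUnits r := by
  rw [pvUnits]; simp

theorem pvUnits_single_cons (c x : Char) (r : List Char) (hc : c ≠ '\\') :
    pvUnits (c :: x :: r) = [c] :: pvUnits (x :: r) := by rw [pvUnits]; simp [hc]

theorem pvUnits_one (c : Char) : pvUnits [c] = [[c]] := by rw [pvUnits]

theorem pvCntU_cons_false (d c : Char) (r : List Char) :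
    pvCntU d false (c :: r) =
      if c = '\\' then pvCntU d true r
      else if c = d then 1 + pvCntU d false r else pvCntU d false r := by rw [pvCntU]; simp

theorem pvCntU_cons_true (d c : Char) (r : List Char) : pvCntU d true (c :: r) = pvCntU d false r := by
  rw [pvCntU]; simp

theorem pvCntU_nil (d : Char) (e : Bool) : pvCntU d e [] = 0 := by rw [pvCntU]

theorem pv_scan_units (d : Char) (hd : d ≠ '\\') (cs : List Char) :
    ∀ parts buf, pvScanA d cs parts buf false = pvScanU d (pvUnits cs) parts buf := by
  induction cs using pvUnits.induct with
  | case1 => intro parts buf; simp [pvScanA, pvUnits, pvScanU]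
  | case2 x r ih =>
    intro parts buf
    rw [pvUnits_pair, pvScanU_cons, if_neg (by simp), pvScanA_cons_false, if_pos rfl,
      pvScanA_cons_true, ih]
    simp
  | case3 c x r hc ih =>
    intro parts buf
    rw [pvUnits_single_cons c x r hc, pvScanU_cons, pvScanA_cons_false, if_neg hc]
    by_cases hcd : c = d
    · subst hcd
      by_cases hp : parts.length < 2
      · rw [if_pos ⟨rfl, hp⟩, if_pos ⟨rfl, hp⟩, ih]
      · rw [if_neg (by tauto), if_neg (by tauto), ih]
    · rw [if_neg (by simp [hcd]), if_neg (by simp [hcd]), ih]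
  | case4 c =>
    intro parts buf
    rw [pvUnits_one, pvScanU_cons, pvScanA_cons_false]
    by_cases hc : c = '\\'
    · subst hc
      rw [if_pos rfl, pvScanA_nil, if_neg (by simp [Ne.symm hd]), pvScanU]
    · rw [if_neg hc]
      by_cases hcd : c = d
      · subst hcd
        by_cases hp : parts.length < 2
        · rw [if_pos ⟨rfl, hp⟩, if_pos ⟨rfl, hp⟩, pvScanA_nil, pvScanU]
        · rw [if_neg (by tauto), if_neg (by tauto), pvScanA_nil, pvScanU]
      · rw [if_neg (by simp [hcd]), if_neg (by simp [hcd]), pvScanA_nil, pvScanU]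

theorem pv_cnt_units (d : Char) (hd : d ≠ '\\') (cs : List Char) :
    pvCntU d false cs = (pvUnits cs).count [d] := by
  induction cs using pvUnits.induct with
  | case1 => simp [pvCntU, pvUnits]
  | case2 x r ih =>
    rw [pvUnits_pair, pvCntU_cons_false, if_pos rfl, pvCntU_cons_true, ih, List.count_cons]
    simp
  | case3 c x r hc ih =>
    rw [pvUnits_single_cons c x r hc, pvCntU_cons_false, if_neg hc, List.count_cons, ← ih]
    by_cases hcd : c = d
    · subst hcd; rw [if_pos rfl]; simp [Nat.add_comm]
    · rw [if_neg hcd]; simp [hcd]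
  | case4 c =>
    rw [pvUnits_one, pvCntU_cons_false, List.count_cons]
    by_cases hc : c = '\\'
    · subst hc; rw [if_pos rfl, pvCntU_nil]; simp [Ne.symm hd]
    · rw [if_neg hc]
      by_cases hcd : c = d
      · subst hcd; rw [if_pos rfl, pvCntU_nil]; simp
      · rw [if_neg hcd, pvCntU_nil]; simp [hcd]

theorem pv_cnt_bs (cs : List Char) : ∀ esc, pvCntU '\\' esc cs = 0 := by
  induction cs with
  | nil => intro esc; rfl
  | cons c r ih =>
    intro esc
    by_cases h : c = '\\' <;> cases esc <;> simp [pvCntU, h, ih]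

theorem pv_scanU_pre (d : Char) (pre suf : List (List Char)) (h0 : [d] ∉ pre) :
    ∀ parts buf, parts.length < 2 →
      pvScanU d (pre ++ [d] :: suf) parts buf = pvScanU d suf (parts ++ [buf ++ pre.flatten]) [] := by
  induction pre with
  | nil => intro parts buf hlt; simp [pvScanU, hlt]
  | cons u pre ih =>
    intro parts buf hlt
    have hu : u ≠ [d] := fun h => h0 (h ▸ List.mem_cons_self)
    simp only [List.cons_append, pvScanU]
    rw [if_neg (by simp [hu]), ih (fun h => h0 (List.mem_cons_of_mem _ h)) parts (buf ++ u) hlt]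
    simp

theorem pv_scanU_full (d : Char) (us : List (List Char)) :
    ∀ parts buf, ¬ parts.length < 2 → pvScanU d us parts buf = parts ++ [buf ++ us.flatten] := by
  induction us with
  | nil => intro parts buf _; simp [pvScanU]
  | cons u rest ih =>
    intro parts buf hge
    simp only [pvScanU]
    rw [if_neg (by tauto), ih parts (buf ++ u) hge]
    simp

theorem pv_join_nil (ls : List (List Char)) : PySem.Chars.join [] ls = ls.flatten := by
  induction ls with
  | nil => simp [PySem.Chars.join, List.intercalate, List.intersperse]
  | cons u rest ih =>
    cases rest with
    | nil => simp [PySem.Chars.join, List.intercalate, List.intersperse]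
    | cons v r => rw [PySem.Chars.join_cons_cons] at *; simp_all

-- ===== VERDICT (by name: the statement is the Claim_ definition above) =====
theorem parse_sed_substitute_py_spec : Claim_equal_parse_sed_substitute_py := by
  intro script _ hpre
  unfold Pre_parse_sed_substitute_py at hpre
  unfold Spec_parse_sed_substitute_py parse_sed_substitute_py parse_sed_substitute_py_alt
  set raw := PySem.Chars.strip script.toList with hraw
  set delim := PySem.List.pyGetD raw 1 ' ' with hdelim
  set body := PySem.List.slice raw (some 2) none with hbody
  obtain ⟨h4, hs, hcnt⟩ := hpre
  rw [← hdelim, ← hbody] at hcnt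
  have hd : delim ≠ '\\' := by
    intro h
    rw [h, pv_cnt_bs body false] at hcnt
    omega
  have hguard : ¬ (raw.length < 4 ∨ ¬ (PySem.Chars.startswith raw ['s'] = true)) := by
    simp [hs]; omega
  rw [if_neg hguard, if_neg hguard]
  set us := pvUnits body with hus
  have hcu : 2 ≤ us.count [delim] := by rw [← pv_cnt_units delim hd body]; exact hcnt
  have hmem : [delim] ∈ us := List.count_pos_iff.mp (by omega)
  obtain ⟨a, heqa⟩ := Option.isSome_iff_exists.mp ((PySem.List.index?_isSome_iff _ _).mpr hmem)
  obtain ⟨pre, suf, hsplit, hlen, hnpre⟩ := (PySem.List.index?_eq_some_iff _ _ _).mp heqa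
  have hcast1 : ((a : Int) + 1) = (((a + 1 : Nat)) : Int) := by push_cast; ring
  have htail : PySem.List.slice us (some ((a : Int) + 1)) none = suf := by
    rw [hcast1, PySem.List.slice_from_natCast, hsplit,
      show pre ++ [delim] :: suf = (pre ++ [[delim]]) ++ suf from by simp]
    exact List.drop_left' (by simp [hlen])
  have hmem2 : [delim] ∈ suf := by
    by_contra hno
    have hle : us.count [delim] ≤ 1 := by
      rw [hsplit, List.count_append, List.count_cons]
      simp [List.count_eq_zero.mpr hnpre, List.count_eq_zero.mpr hno]
    omega
  obtain ⟨b, heqb⟩ := Option.isSome_iff_exists.mp ((PySem.List.index?_isSome_iff _ _).mpr hmem2)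
  obtain ⟨pre2, suf2, hsplit2, hlen2, hnpre2⟩ := (PySem.List.index?_eq_some_iff _ _ _).mp heqb
  -- A-side: the scan produces exactly the three segments
  have hparts : pvScanA delim body [] [] false = [pre.flatten, pre2.flatten, suf2.flatten] := by
    rw [pv_scan_units delim hd body, ← hus, hsplit, hsplit2,
      pv_scanU_pre delim pre _ hnpre [] [] (by simp),
      pv_scanU_pre delim pre2 _ hnpre2 _ [] (by simp),
      pv_scanU_full delim suf2 _ [] (by simp)]
    simp
  -- B-side slices
  have htake1 : PySem.List.slice us none (some (a : Int)) = pre := by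
    rw [PySem.List.slice_to_natCast, hsplit, ← hlen, List.take_left]
  have htake2 : PySem.List.slice suf none (some (b : Int)) = pre2 := by
    rw [PySem.List.slice_to_natCast, hsplit2, ← hlen2, List.take_left]
  have hcast2 : ((b : Int) + 1) = (((b + 1 : Nat)) : Int) := by push_cast; ring
  have hdrop2 : PySem.List.slice suf (some ((b : Int) + 1)) none = suf2 := by
    rw [hcast2, PySem.List.slice_from_natCast, hsplit2,
      show pre2 ++ [delim] :: suf2 = (pre2 ++ [[delim]]) ++ suf2 from by simp]
    exact List.drop_left' (by simp [hlen2])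
  simp only []
  rw [hparts]
  rw [← hdelim]
  simp only [heqa, htail, heqb, htake1, htake2, hdrop2, pv_join_nil]
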